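-- pv_equiv track=rewrite | github.com/usandomir-frba/NanoVNA-UTN-Toolkit | tests/test_frequency_formatting.py | limit_frequency_input_new
-- ===== SOURCE A (Python) =====
-- def limit_frequency_input_new(text, max_digits=6, max_decimals=3):
--     """Frequency input limiter with new limits (6 digits, 3 decimals)."""
--     filtered = "".join(c for c in text if c.isdigit() or c == ".")
--
--     if filtered.count(".") > 1:
--         parts = filtered.split(".", 1)
--         filtered = parts[0] + "." + "".join(parts[1:]).replace(".", "")
--
--     if "." in filtered:
--         integer_part, decimal_part = filtered.split(".", 1)
--         integer_part = integer_part[:max_digits]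
--         decimal_part = decimal_part[:max_decimals]
--         filtered = integer_part + "." + decimal_part
--     else:
--         filtered = filtered[:max_digits]
--
--     return filtered
-- ===== SOURCE B (Python) =====
-- def limit_frequency_input_new(text, max_digits=6, max_decimals=3):
--     """Single pass: partition the digits around the first '.', then truncate."""
--     int_digits = []
--     dec_digits = []
--     seen_dot = False
--     for c in text:
--         if c == ".":
--             seen_dot = True
--         elif c.isdigit():
--             (dec_digits if seen_dot else int_digits).append(c)
--     if seen_dot:
--         return "".join(int_digits[:max_digits]) + "." + "".join(dec_digits[:max_decimals])
--     return "".join(int_digits[:max_digits])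
-- ===== Notes on version B (the rewrite author's own statement) =====
-- stated objective: simpler
-- what changed: Replaces A's multi-stage string pipeline (filter-join, count, split, replace, second split, slices) by one pass over the characters that partitions the digits around the first dot, followed by the two truncations.
import Mathlib
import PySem

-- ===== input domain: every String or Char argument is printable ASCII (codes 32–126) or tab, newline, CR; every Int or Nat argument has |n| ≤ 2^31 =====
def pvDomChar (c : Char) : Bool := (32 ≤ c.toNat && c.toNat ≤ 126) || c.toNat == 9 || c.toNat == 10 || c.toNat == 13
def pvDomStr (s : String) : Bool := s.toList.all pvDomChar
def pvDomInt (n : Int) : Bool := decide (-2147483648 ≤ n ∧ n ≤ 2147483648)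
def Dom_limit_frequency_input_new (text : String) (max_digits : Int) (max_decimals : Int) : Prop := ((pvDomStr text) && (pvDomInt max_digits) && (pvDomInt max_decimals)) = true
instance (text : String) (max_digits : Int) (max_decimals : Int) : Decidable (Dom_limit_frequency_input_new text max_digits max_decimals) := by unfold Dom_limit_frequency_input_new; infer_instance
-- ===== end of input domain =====

-- B replaces A's multi-stage string pipeline by a single pass partitioning the digits around the first dot; objective: simpler.


-- ===== PORT A =====
-- transliteration of A: filter digits/dots; if more than one '.', keep the first and strip the rest;
-- then split at the '.' and truncate the two parts with Python slices.
def limit_frequency_input_new (text : String) (max_digits : Int) (max_decimals : Int) : String :=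
  let filtered0 := text.toList.filter (fun c => PySem.Chars.isdigit c || c == '.')
  let filtered1 :=
    if PySem.Chars.count filtered0 ['.'] > 1 then
      -- parts = filtered.split(".", 1) has exactly 2 pieces here (count > 1)
      let parts := PySem.Chars.splitOnMax filtered0 ['.'] 1
      parts.headD [] ++ ['.'] ++ PySem.Chars.replace (PySem.Chars.join [] (parts.drop 1)) ['.'] []
    else filtered0
  if PySem.Chars.isIn ['.'] filtered1 then
    let parts2 := PySem.Chars.splitOnMax filtered1 ['.'] 1
    let integer_part := PySem.List.slice (parts2.headD []) none (some max_digits)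
    let decimal_part := PySem.List.slice (parts2.getD 1 []) none (some max_decimals)
    String.ofList (integer_part ++ ['.'] ++ decimal_part)
  else
    String.ofList (PySem.List.slice filtered1 none (some max_digits))

-- ===== PORT B =====
-- one step of B's loop: a dot marks the decimal side, digits are routed to the active side, others skipped
def altStep (st : Bool × List Char × List Char) (c : Char) : Bool × List Char × List Char :=
  if c == '.' then (true, st.2.1, st.2.2)
  else if PySem.Chars.isdigit c then
    (if st.1 then (true, st.2.1, st.2.2 ++ [c]) else (false, st.2.1 ++ [c], st.2.2))
  else st

def limit_frequency_input_new_alt (text : String) (max_digits : Int) (max_decimals : Int) : String :=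
  let st := text.toList.foldl altStep (false, [], [])
  if st.1 then
    String.ofList (PySem.List.slice st.2.1 none (some max_digits) ++ ['.'] ++ PySem.List.slice st.2.2 none (some max_decimals))
  else
    String.ofList (PySem.List.slice st.2.1 none (some max_digits))

-- ===== PRECONDITION & SPEC =====
def Spec_limit_frequency_input_new (text : String) (max_digits : Int) (max_decimals : Int) (out : String) : Prop := out = limit_frequency_input_new_alt text max_digits max_decimals
instance (text : String) (max_digits : Int) (max_decimals : Int) (out : String) : Decidable (Spec_limit_frequency_input_new text max_digits max_decimals out) := by unfold Spec_limit_frequency_input_new; infer_instance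

-- ===== CLAIM (what is proved, stated in full; the proofs are below) =====
def Claim_equal_limit_frequency_input_new : Prop := ∀ (text : String) (max_digits : Int) (max_decimals : Int), Dom_limit_frequency_input_new text max_digits max_decimals → Spec_limit_frequency_input_new text max_digits max_decimals (limit_frequency_input_new text max_digits max_decimals)

-- ===== LEMMAS AND PROOFS =====

theorem isdigit_dot : PySem.Chars.isdigit '.' = false := by decide

-- Chars.count with the single-character needle "." is List.count
theorem countgo_dot (l : List Char) : ∀ (fuel acc : Nat), l.length ≤ fuel →
    PySem.Chars.count.go ['.'] fuel l acc = acc + l.count '.' := by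
  induction l with
  | nil => intro fuel acc _; cases fuel <;> simp [PySem.Chars.count.go]
  | cons c t ih =>
    intro fuel acc h
    cases fuel with
    | zero => simp at h
    | succ f =>
      by_cases hc : c = '.'
      · subst hc
        simp [PySem.Chars.count.go, List.isPrefixOf, ih f (acc+1) (by simpa using h)]
        omega
      · simp [PySem.Chars.count.go, List.isPrefixOf, hc, Ne.symm hc, ih f acc (by simpa using h)]

theorem count_dot (l : List Char) : PySem.Chars.count l ['.'] = l.count '.' := by
  simp [PySem.Chars.count, countgo_dot l l.length 0 le_rfl]

-- split(".", 1) characterised via takeWhile/dropWhile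
theorem splitgo_zero (fuel : Nat) (l : List Char) (acc : List (List Char)) :
    PySem.Chars.splitOnMax.go ['.'] fuel 0 l [] acc = acc.reverse ++ [l] := by
  cases fuel <;> cases l <;> simp [PySem.Chars.splitOnMax.go]

theorem splitgo_one (l : List Char) : ∀ (fuel : Nat) (cur : List Char) (acc : List (List Char)),
    l.length ≤ fuel →
    PySem.Chars.splitOnMax.go ['.'] fuel 1 l cur acc =
      if '.' ∈ l then
        acc.reverse ++ [cur.reverse ++ l.takeWhile (fun c => !(c == '.')), (l.dropWhile (fun c => !(c == '.'))).tail]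
      else acc.reverse ++ [cur.reverse ++ l] := by
  induction l with
  | nil => intro fuel cur acc _; cases fuel <;> simp [PySem.Chars.splitOnMax.go]
  | cons c t ih =>
    intro fuel cur acc h
    cases fuel with
    | zero => simp at h
    | succ f =>
      by_cases hc : c = '.'
      · subst hc
        simp [PySem.Chars.splitOnMax.go, List.isPrefixOf, splitgo_zero f t (cur.reverse :: acc)]
      · simp [PySem.Chars.splitOnMax.go, List.isPrefixOf, hc, Ne.symm hc,
              ih f (c :: cur) acc (by simpa using h)]

theorem split1 (l : List Char) :
    PySem.Chars.splitOnMax l ['.'] 1 =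
      if '.' ∈ l then [l.takeWhile (fun c => !(c == '.')), (l.dropWhile (fun c => !(c == '.'))).tail]
      else [l] := by
  have := splitgo_one l (l.length + 1) [] [] (by omega)
  simp [PySem.Chars.splitOnMax]
  simpa using this

-- replace(".", "") is a filter
theorem replacego_dot (l : List Char) : ∀ (fuel : Nat) (acc : List Char), l.length ≤ fuel →
    PySem.Chars.replace.go ['.'] [] fuel l acc = acc.reverse ++ l.filter (fun c => !(c == '.')) := by
  induction l with
  | nil => intro fuel acc _; cases fuel <;> simp [PySem.Chars.replace.go]
  | cons c t ih =>
    intro fuel acc h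
    cases fuel with
    | zero => simp at h
    | succ f =>
      by_cases hc : c = '.'
      · subst hc
        simp [PySem.Chars.replace.go, List.isPrefixOf, ih f acc (by simpa using h)]
      · simp [PySem.Chars.replace.go, List.isPrefixOf, hc, Ne.symm hc, ih f (c :: acc) (by simpa using h)]

theorem replace_dot (l : List Char) :
    PySem.Chars.replace l ['.'] [] = l.filter (fun c => !(c == '.')) := by
  simp [PySem.Chars.replace, replacego_dot l l.length [] le_rfl]

theorem isIn_dot (l : List Char) : PySem.Chars.isIn ['.'] l = decide ('.' ∈ l) := by
  by_cases h : '.' ∈ l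
  · simp only [h, decide_true]
    rw [PySem.Chars.isIn_iff_infix]
    obtain ⟨s, t, rfl⟩ := List.append_of_mem h
    exact ⟨s, t, by simp⟩
  · simp [h, PySem.Chars.isIn_eq_false_iff]
    intro hinf
    exact h (hinf.mem (by simp))

-- B's fold characterised
theorem scan_true (cs : List Char) : ∀ (I D : List Char),
    cs.foldl altStep (true, I, D) = (true, I, D ++ cs.filter PySem.Chars.isdigit) := by
  induction cs with
  | nil => simp
  | cons c t ih =>
    intro I D
    by_cases hc : c = '.'
    · subst hc; simp [altStep, ih, isdigit_dot]
    · by_cases hd : PySem.Chars.isdigit c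
      · simp [altStep, hc, hd, ih]
      · simp [altStep, hc, hd, ih]

theorem scan_false (cs : List Char) : ∀ (I D : List Char),
    cs.foldl altStep (false, I, D) =
      (decide ('.' ∈ cs), I ++ (cs.takeWhile (fun c => !(c == '.'))).filter PySem.Chars.isdigit,
        D ++ (cs.dropWhile (fun c => !(c == '.'))).filter PySem.Chars.isdigit) := by
  induction cs with
  | nil => simp
  | cons c t ih =>
    intro I D
    by_cases hc : c = '.'
    · subst hc
      simp [altStep, scan_true, isdigit_dot]
    · by_cases hd : PySem.Chars.isdigit c
      · simp [altStep, hc, Ne.symm hc, hd, ih]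
      · simp [altStep, hc, Ne.symm hc, hd, ih]

-- commuting the digit/dot filter with takeWhile/dropWhile at the first dot
theorem tw_filter (cs : List Char) :
    (cs.filter (fun c => PySem.Chars.isdigit c || c == '.')).takeWhile (fun c => !(c == '.')) =
      (cs.takeWhile (fun c => !(c == '.'))).filter PySem.Chars.isdigit := by
  induction cs with
  | nil => simp
  | cons c t ih =>
    by_cases hc : c = '.'
    · subst hc; simp
    · by_cases hd : PySem.Chars.isdigit c
      · simp [hc, hd, ih]
      · simp [hc, hd, ih]

theorem dw_filter (cs : List Char) :
    (cs.filter (fun c => PySem.Chars.isdigit c || c == '.')).dropWhile (fun c => !(c == '.')) =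
      (cs.dropWhile (fun c => !(c == '.'))).filter (fun c => PySem.Chars.isdigit c || c == '.') := by
  induction cs with
  | nil => simp
  | cons c t ih =>
    by_cases hc : c = '.'
    · subst hc; simp
    · by_cases hd : PySem.Chars.isdigit c
      · simp [hc, hd, ih]
      · simp [hc, hd, ih]

theorem filter_nd_filter_p (l : List Char) :
    (l.filter (fun c => PySem.Chars.isdigit c || c == '.')).filter (fun c => !(c == '.')) =
      l.filter PySem.Chars.isdigit := by
  rw [List.filter_filter]
  apply List.filter_congr
  intro c _
  by_cases hc : c = '.'
  · subst hc; decide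
  · have : (c == '.') = false := by simp [hc]
    simp [this]

-- the first failing element of dropWhile is the dot
theorem dropWhile_dot_cons (l : List Char) (h : '.' ∈ l) :
    l.dropWhile (fun c => !(c == '.')) = '.' :: (l.dropWhile (fun c => !(c == '.'))).tail := by
  induction l with
  | nil => simp at h
  | cons c t ih =>
    by_cases hc : c = '.'
    · subst hc
      have hb : (('.' : Char) == '.') = true := by decide
      rw [List.dropWhile_cons]
      simp only [hb, Bool.not_true]
      simp
    · have hne : (c == '.') = false := by simp [hc]
      have hm : '.' ∈ t := by
        rcases List.mem_cons.mp h with h' | h'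
        · exact absurd h'.symm hc
        · exact h'
      rw [List.dropWhile_cons]
      simp only [hne, Bool.not_false, if_true]
      exact ih hm

-- takeWhile/dropWhile on I ++ '.' :: X when I has no dots
theorem tw_dw_append (I X : List Char) (h : ∀ x ∈ I, (x == '.') = false) :
    (I ++ '.' :: X).takeWhile (fun c => !(c == '.')) = I ∧
    (I ++ '.' :: X).dropWhile (fun c => !(c == '.')) = '.' :: X := by
  induction I with
  | nil => simp
  | cons c t ih =>
    have hc := h c (by simp)
    have := ih (fun x hx => h x (by simp [hx]))
    simp [hc, this.1, this.2]

-- ===== VERDICT (by name: the statement is the Claim_ definition above) =====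
theorem limit_frequency_input_new_spec : Claim_equal_limit_frequency_input_new := by
  intro text m d _
  unfold Spec_limit_frequency_input_new limit_frequency_input_new limit_frequency_input_new_alt
  rw [scan_false]
  simp only [List.nil_append, count_dot, isIn_dot]
  by_cases hmem : '.' ∈ text.toList
  · have hmemF : '.' ∈ List.filter (fun c => PySem.Chars.isdigit c || c == '.') text.toList :=
      List.mem_filter.mpr ⟨hmem, by decide⟩
    have hdw := dropWhile_dot_cons text.toList hmem
    generalize ht' : (List.dropWhile (fun c => !(c == '.')) text.toList).tail = t' at hdw
    have htwF := tw_filter text.toList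
    have hdwF : (List.filter (fun c => PySem.Chars.isdigit c || c == '.') text.toList).dropWhile (fun c => !(c == '.'))
        = '.' :: List.filter (fun c => PySem.Chars.isdigit c || c == '.') t' := by
      rw [dw_filter, hdw, List.filter_cons]
      simp
    have hIfilter : ∀ x ∈ List.filter PySem.Chars.isdigit (List.takeWhile (fun c => !(c == '.')) text.toList), (x == '.') = false := by
      intro x hx
      have := List.mem_takeWhile_imp (List.mem_filter.mp hx).1
      simpa using this
    have hcount : List.count '.' (List.filter (fun c => PySem.Chars.isdigit c || c == '.') text.toList)
        = 1 + List.count '.' (List.filter (fun c => PySem.Chars.isdigit c || c == '.') t') := by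
      conv_lhs => rw [← List.takeWhile_append_dropWhile (p := fun c => !(c == '.'))
        (l := List.filter (fun c => PySem.Chars.isdigit c || c == '.') text.toList)]
      rw [List.count_append, hdwF, htwF]
      have h0 : List.count '.' (List.filter PySem.Chars.isdigit (List.takeWhile (fun c => !(c == '.')) text.toList)) = 0 := by
        rw [List.count_eq_zero]
        intro hmm
        have := hIfilter _ hmm
        simp at this
      rw [h0, List.count_cons_self]
      omega
    have hsplit2 : ∀ X : List Char,
        PySem.Chars.splitOnMax (List.filter PySem.Chars.isdigit (List.takeWhile (fun c => !(c == '.')) text.toList) ++ '.' :: X) ['.'] 1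
          = [List.filter PySem.Chars.isdigit (List.takeWhile (fun c => !(c == '.')) text.toList), X] := by
      intro X
      obtain ⟨h1, h2⟩ := tw_dw_append _ X hIfilter
      rw [split1, if_pos (by simp), h1, h2]
      simp
    have hBdec : List.filter PySem.Chars.isdigit (List.dropWhile (fun c => !(c == '.')) text.toList)
        = List.filter PySem.Chars.isdigit t' := by
      rw [hdw, List.filter_cons]
      simp [isdigit_dot]
    have hBif : (decide ('.' ∈ text.toList) = true) := by simp [hmem]
    by_cases hgt : List.count '.' (List.filter (fun c => PySem.Chars.isdigit c || c == '.') text.toList) > 1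
    · rw [if_pos hgt, split1, if_pos hmemF, htwF, hdwF]
      simp only [List.tail_cons, List.headD_cons, List.drop_succ_cons, List.drop_zero]
      simp only [PySem.Chars.join_singleton, replace_dot, filter_nd_filter_p]
      have hre : List.filter PySem.Chars.isdigit (List.takeWhile (fun c => !(c == '.')) text.toList) ++ ['.'] ++ List.filter PySem.Chars.isdigit t'
          = List.filter PySem.Chars.isdigit (List.takeWhile (fun c => !(c == '.')) text.toList) ++ '.' :: List.filter PySem.Chars.isdigit t' := by
        simp
      rw [hre, if_pos (by simp), hsplit2]
      rw [if_pos hBif, hBdec]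
      simp [List.getD]
    · have hk : List.count '.' (List.filter (fun c => PySem.Chars.isdigit c || c == '.') t') = 0 := by omega
      have hnot : '.' ∉ List.filter (fun c => PySem.Chars.isdigit c || c == '.') t' := List.count_eq_zero.mp hk
      have hall : ∀ x ∈ List.filter (fun c => PySem.Chars.isdigit c || c == '.') t', (!(x == '.')) = true := by
        intro x hx
        have hne : ¬ x = '.' := fun e => hnot (e ▸ hx)
        simpa using hne
      have heq : List.filter (fun c => PySem.Chars.isdigit c || c == '.') t' = List.filter PySem.Chars.isdigit t' := by
        rw [← filter_nd_filter_p t']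
        exact (List.filter_eq_self.mpr hall).symm
      rw [if_neg hgt, split1, if_pos hmemF, htwF, hdwF]
      simp only [List.tail_cons, List.headD_cons]
      rw [if_pos hBif, hBdec, heq]
      simp [List.getD, hmem]
  · have hnF : '.' ∉ List.filter (fun c => PySem.Chars.isdigit c || c == '.') text.toList := by
      intro h; exact hmem (List.mem_filter.mp h).1
    have hc0 : List.count '.' (List.filter (fun c => PySem.Chars.isdigit c || c == '.') text.toList) = 0 :=
      List.count_eq_zero.mpr hnF
    have h1 : ¬ List.count '.' (List.filter (fun c => PySem.Chars.isdigit c || c == '.') text.toList) > 1 := by omega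
    rw [if_neg h1]
    have h2 : ¬ ((decide ('.' ∈ List.filter (fun c => PySem.Chars.isdigit c || c == '.') text.toList)) = true) := by
      simp [hnF]
    rw [if_neg h2]
    have h3 : ¬ ((decide ('.' ∈ text.toList)) = true) := by simp [hmem]
    rw [if_neg h3]
    have htw : List.takeWhile (fun c => !(c == '.')) text.toList = text.toList := by
      rw [List.takeWhile_eq_self_iff]
      intro x hx
      have : ¬ x = '.' := fun e => hmem (e ▸ hx)
      simpa using this
    have hFdig : List.filter (fun c => PySem.Chars.isdigit c || c == '.') text.toList = List.filter PySem.Chars.isdigit text.toList :=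
      List.filter_congr (fun x hx => by
        have : ¬ x = '.' := fun e => hmem (e ▸ hx)
        simp [this])
    rw [hFdig, htw]
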